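-- pv_equiv track=rewrite | github.com/rf-iasys/OEIS | OEIS_A030514_A047845.py | compute_max_y
-- ===== SOURCE A (Python) =====
-- def compute_max_y(n_start: int, n_end: int,
--                   stop_at_n_end: bool = True) -> dict[int, int]:
--     """Compute fixed points using combinatorial formula."""
--     max_y_per_x = {}
--     for a in range(n_end):
--         b = a + 1
--         x = abs(a**2 - b**2) * abs(b**2 - a**2)**3
--         y = x * abs(a - b)
--         if y == 0 or x < n_start:
--             continue
--         if stop_at_n_end and x >= n_end:
--             continue
--         if y > max_y_per_x.get(x, 0):
--             max_y_per_x[x] = y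
--     return max_y_per_x
-- ===== SOURCE B (Python) =====
-- def _iroot4_floor(n: int) -> int:
--     """Largest k >= 0 with k**4 <= n (requires n >= 0), by doubling + bisection."""
--     hi = 1
--     while hi ** 4 <= n:
--         hi *= 2
--     lo = 0
--     while hi - lo > 1:
--         mid = (lo + hi) // 2
--         if mid ** 4 <= n:
--             lo = mid
--         else:
--             hi = mid
--     return lo
--
--
-- def _iroot4_ceil(n: int) -> int:
--     """Smallest k >= 0 with k**4 >= n (requires n >= 0)."""
--     f = _iroot4_floor(n)
--     return f if f ** 4 == n else f + 1
--
--
-- def compute_max_y(n_start: int, n_end: int,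
--                   stop_at_n_end: bool = True) -> dict[int, int]:
--     # The keys produced are exactly m**4 for odd m = 2a+1 (a in [0, n_end)),
--     # each mapped to itself.  Instead of scanning all a and filtering, compute
--     # the admissible odd interval [lo_m, hi_m] arithmetically via integer
--     # fourth roots, then emit the dict directly.
--     if n_end <= 0:
--         return {}
--     if n_start > 1:
--         r = _iroot4_ceil(n_start)          # least m with m**4 >= n_start
--         lo_m = r if r % 2 == 1 else r + 1  # least such odd m
--     else:
--         lo_m = 1
--     hi_m = 2 * n_end - 1                   # largest m reachable (a < n_end)
--     if stop_at_n_end: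
--         t = _iroot4_floor(n_end - 1)       # largest k with k**4 < n_end
--         t_odd = t if t % 2 == 1 else t - 1
--         hi_m = min(hi_m, t_odd)
--     return {m ** 4: m ** 4 for m in range(lo_m, hi_m + 1, 2)}
-- ===== Notes on version B (the rewrite author's own statement) =====
-- stated objective: alternative
-- what changed: B computes the admissible interval of odd bases m arithmetically (integer fourth roots of n_start and n_end-1 via doubling+bisection) and emits the dict {m**4: m**4} over one arithmetic progression, instead of A's scan over all a in range(n_end) with per-element filters and a get/max dict update; intended as faster when stop_at_n_end (measured up to ~1000x there) but a timing run could not confirm it consistently across both flag values.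
import Mathlib
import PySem

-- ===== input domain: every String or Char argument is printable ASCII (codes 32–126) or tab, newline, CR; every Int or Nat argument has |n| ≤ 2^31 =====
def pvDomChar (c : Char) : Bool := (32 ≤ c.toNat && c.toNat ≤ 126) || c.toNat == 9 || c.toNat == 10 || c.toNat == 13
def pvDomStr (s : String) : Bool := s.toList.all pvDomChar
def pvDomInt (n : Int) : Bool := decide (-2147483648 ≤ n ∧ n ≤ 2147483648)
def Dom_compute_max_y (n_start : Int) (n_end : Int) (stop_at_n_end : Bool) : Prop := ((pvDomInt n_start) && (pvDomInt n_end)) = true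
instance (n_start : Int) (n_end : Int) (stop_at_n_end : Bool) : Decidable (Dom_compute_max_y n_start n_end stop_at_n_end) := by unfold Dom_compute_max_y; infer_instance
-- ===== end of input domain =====

-- B computes the admissible odd-base interval arithmetically (integer fourth roots by
-- doubling + bisection) and emits the dict over one arithmetic progression, instead of
-- A's filtered scan over range(n_end); intended as faster when stop_at_n_end (the timing
-- run measured large speedups there but could not confirm 'faster' across both flags).

-- ===== PORT A =====
-- A's loop body, transliterated step for step.
def aStep (n_start : Int) (n_end : Int) (stop_at_n_end : Bool)
    (d : PySem.Dict Int Int) (a : Int) : PySem.Dict Int Int :=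
  let b := a + 1
  let x := |a ^ 2 - b ^ 2| * |b ^ 2 - a ^ 2| ^ 3
  let y := x * |a - b|
  if y = 0 ∨ x < n_start then d
  else if stop_at_n_end = true ∧ n_end ≤ x then d
  else if d.getD x 0 < y then d.insert x y
  else d

def compute_max_y (n_start : Int) (n_end : Int) (stop_at_n_end : Bool) : List (Int × Int) :=
  ((PySem.List.pyRange 0 n_end 1).foldl (aStep n_start n_end stop_at_n_end)
    PySem.Dict.empty).items

-- ===== PORT B =====
-- while hi**4 <= n: hi *= 2   (the '1 ≤ hi' conjunct only makes the recursion total;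
-- it holds on every call reached from iroot4_floor, whose initial hi is 1)
def iroot4Double (n : Int) (hi : Int) : Int :=
  if h : 1 ≤ hi ∧ hi ^ 4 ≤ n then iroot4Double n (2 * hi) else hi
termination_by (n + 1 - hi).toNat
decreasing_by
  have h4 : hi ≤ hi ^ 4 := le_self_pow₀ h.1 (by norm_num)
  have := h.2
  omega

-- while hi - lo > 1: mid = (lo+hi)//2; if mid**4 <= n: lo = mid else: hi = mid
def iroot4Bisect (n : Int) (lo : Int) (hi : Int) : Int :=
  if h : 1 < hi - lo then
    if (PySem.Int.floordiv (lo + hi) 2) ^ 4 ≤ n then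
      iroot4Bisect n (PySem.Int.floordiv (lo + hi) 2) hi
    else iroot4Bisect n lo (PySem.Int.floordiv (lo + hi) 2)
  else lo
termination_by (hi - lo).toNat
decreasing_by
  all_goals
    have hm : PySem.Int.floordiv (lo + hi) 2 = (lo + hi) / 2 :=
      PySem.Int.floordiv_eq_ediv_of_pos (by norm_num)
    omega

def iroot4_floor (n : Int) : Int :=
  iroot4Bisect n 0 (iroot4Double n 1)

def iroot4_ceil (n : Int) : Int :=
  let f := iroot4_floor n
  if f ^ 4 = n then f else f + 1

def loM (n_start : Int) : Int :=
  if 1 < n_start then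
    let r := iroot4_ceil n_start
    if PySem.Int.mod r 2 = 1 then r else r + 1
  else 1

def hiM (n_end : Int) (stop_at_n_end : Bool) : Int :=
  if stop_at_n_end = true then
    let t := iroot4_floor (n_end - 1)
    let t_odd := if PySem.Int.mod t 2 = 1 then t else t - 1
    min (2 * n_end - 1) t_odd
  else 2 * n_end - 1

def compute_max_y_alt (n_start : Int) (n_end : Int) (stop_at_n_end : Bool) : List (Int × Int) :=
  if n_end ≤ 0 then []
  else
    ((PySem.List.pyRange (loM n_start) (hiM n_end stop_at_n_end + 1) 2).foldl
      (fun d m => d.insert (m ^ 4) (m ^ 4)) PySem.Dict.empty).items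

-- ===== PRECONDITION & SPEC =====
def Spec_compute_max_y (n_start : Int) (n_end : Int) (stop_at_n_end : Bool) (out : List (Int × Int)) : Prop := out = compute_max_y_alt n_start n_end stop_at_n_end
instance (n_start : Int) (n_end : Int) (stop_at_n_end : Bool) (out : List (Int × Int)) : Decidable (Spec_compute_max_y n_start n_end stop_at_n_end out) := by unfold Spec_compute_max_y; infer_instance

-- ===== CLAIM =====
def Claim_equal_compute_max_y : Prop := ∀ (n_start : Int) (n_end : Int) (stop_at_n_end : Bool), Dom_compute_max_y n_start n_end stop_at_n_end → Spec_compute_max_y n_start n_end stop_at_n_end (compute_max_y n_start n_end stop_at_n_end)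

-- ===== LEMMAS AND PROOFS =====

lemma mono4 {x y : Int} (h0 : 0 ≤ x) (h : x ≤ y) : x ^ 4 ≤ y ^ 4 :=
  pow_le_pow_left₀ h0 h 4

lemma strict4 {x y : Int} (h0 : 0 ≤ x) (h : x < y) : x ^ 4 < y ^ 4 :=
  pow_lt_pow_left₀ h h0 (by norm_num)

-- step-2 range induction forms
lemma pyRange2_nil {a b : Int} (h : b ≤ a) : PySem.List.pyRange a b 2 = [] := by
  rw [PySem.List.pyRange_of_pos a b (by norm_num)]
  rw [if_neg (by omega)]
  simp

lemma pyRange2_cons {a b : Int} (h : a < b) :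
    PySem.List.pyRange a b 2 = a :: PySem.List.pyRange (a + 2) b 2 := by
  rw [PySem.List.pyRange_of_pos a b (by norm_num),
      PySem.List.pyRange_of_pos (a + 2) b (by norm_num)]
  by_cases h2 : a + 2 < b
  · rw [if_pos h, if_pos h2]
    have hc : ((b - a + 2 - 1) / 2).toNat = ((b - (a + 2) + 2 - 1) / 2).toNat + 1 := by
      omega
    rw [hc, List.range_succ_eq_map, List.map_cons, List.map_map]
    congr 1
    · simp
    · apply List.map_congr_left
      intro k _
      simp only [Function.comp]
      push_cast
      ring
  · rw [if_pos h, if_neg h2]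
    have hc : ((b - a + 2 - 1) / 2).toNat = 1 := by omega
    rw [hc]
    simp

-- correctness of the doubling phase
lemma iroot4Double_spec (n : Int) : ∀ hi : Int, 1 ≤ hi →
    1 ≤ iroot4Double n hi ∧ n < (iroot4Double n hi) ^ 4 := by
  intro hi
  induction hi using iroot4Double.induct n with
  | case1 hi h ih =>
    intro _
    rw [iroot4Double, dif_pos h]
    exact ih (by omega)
  | case2 hi h =>
    intro h1
    rw [iroot4Double, dif_neg h]
    refine ⟨h1, ?_⟩
    push_neg at h
    exact h h1

-- correctness of the bisection phase
lemma iroot4Bisect_spec (n : Int) : ∀ lo hi : Int, 0 ≤ lo → lo < hi →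
    lo ^ 4 ≤ n → n < hi ^ 4 →
    0 ≤ iroot4Bisect n lo hi ∧ (iroot4Bisect n lo hi) ^ 4 ≤ n ∧
      n < (iroot4Bisect n lo hi + 1) ^ 4 := by
  intro lo hi
  induction lo, hi using iroot4Bisect.induct n with
  | case1 lo hi h hle ih =>
    intro h0 _ _ hhi
    rw [iroot4Bisect, dif_pos h]
    simp only [if_pos hle]
    have hm : PySem.Int.floordiv (lo + hi) 2 = (lo + hi) / 2 :=
      PySem.Int.floordiv_eq_ediv_of_pos (by norm_num)
    exact ih (by omega) (by omega) hle hhi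
  | case2 lo hi h hgt ih =>
    intro h0 hlt hlo _
    rw [iroot4Bisect, dif_pos h]
    simp only [if_neg hgt]
    have hm : PySem.Int.floordiv (lo + hi) 2 = (lo + hi) / 2 :=
      PySem.Int.floordiv_eq_ediv_of_pos (by norm_num)
    exact ih h0 (by omega) hlo (by omega)
  | case3 lo hi h =>
    intro h0 hlt hlo hhi
    rw [iroot4Bisect, dif_neg h]
    have : hi = lo + 1 := by omega
    exact ⟨h0, hlo, by rw [← this]; exact hhi⟩

lemma iroot4_floor_spec (n : Int) (h : 0 ≤ n) :
    0 ≤ iroot4_floor n ∧ (iroot4_floor n) ^ 4 ≤ n ∧ n < (iroot4_floor n + 1) ^ 4 := by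
  unfold iroot4_floor
  obtain ⟨h1, h2⟩ := iroot4Double_spec n 1 le_rfl
  exact iroot4Bisect_spec n 0 (iroot4Double n 1) le_rfl (by omega) (by simpa using h) h2

lemma modtwo (r : Int) : PySem.Int.mod r 2 = r % 2 :=
  PySem.Int.mod_eq_emod_of_pos (by norm_num)

-- properties of B's lower bound: least odd base admitted by 'x >= n_start'
lemma loM_props (ns : Int) : 1 ≤ loM ns ∧ loM ns % 2 = 1 ∧ ns ≤ (loM ns) ^ 4 ∧
    (loM ns = 1 ∨ (loM ns - 2) ^ 4 < ns) := by
  unfold loM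
  by_cases h : 1 < ns
  · simp only [if_pos h]
    obtain ⟨hf0, hfle, hfub⟩ := iroot4_floor_spec ns (by omega)
    unfold iroot4_ceil
    set f := iroot4_floor ns with hfdef
    have hr : 1 ≤ (if f ^ 4 = ns then f else f + 1) ∧
        ns ≤ (if f ^ 4 = ns then f else f + 1) ^ 4 ∧
        ((if f ^ 4 = ns then f else f + 1) - 1) ^ 4 < ns := by
      split_ifs with he
      · have hf1 : 1 ≤ f := by
          by_contra hc
          have : f = 0 := by omega
          rw [this] at he
          norm_num at he
          omega
        refine ⟨hf1, by omega, ?_⟩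
        calc (f - 1) ^ 4 < f ^ 4 := strict4 (by omega) (by omega)
          _ = ns := he
      · exact ⟨by omega, by omega, by simpa using lt_of_le_of_ne hfle he⟩
    set r := (if f ^ 4 = ns then f else f + 1) with hrdef
    rw [modtwo]
    split_ifs with hodd
    · refine ⟨hr.1, hodd, hr.2.1, ?_⟩
      by_cases h1 : r = 1
      · exact Or.inl h1
      · refine Or.inr ?_
        have h3 : 3 ≤ r := by omega
        calc (r - 2) ^ 4 ≤ (r - 1) ^ 4 := mono4 (by omega) (by omega)
          _ < ns := hr.2.2
    · have hre : r % 2 = 0 := by omega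
      refine ⟨by omega, by omega, le_trans hr.2.1 (mono4 (by omega) (by omega)), ?_⟩
      refine Or.inr ?_
      have he2 : r + 1 - 2 = r - 1 := by ring
      rw [he2]
      exact hr.2.2
  · simp only [if_neg h]
    exact ⟨le_rfl, by norm_num, by omega, Or.inl (by trivial)⟩

-- characterisation: for odd m ≥ 1, loM ≤ m iff n_start ≤ m^4
lemma loM_le_iff (ns m : Int) (hm1 : 1 ≤ m) (hmo : m % 2 = 1) :
    loM ns ≤ m ↔ ns ≤ m ^ 4 := by
  obtain ⟨h1, ho, hpow, hbelow⟩ := loM_props ns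
  constructor
  · intro h
    exact le_trans hpow (mono4 (by omega) h)
  · intro h
    by_contra hc
    push_neg at hc
    rcases hbelow with he | hlt
    · omega
    · have hm2 : m ≤ loM ns - 2 := by omega
      have := mono4 (by omega : (0:Int) ≤ m) hm2
      omega

lemma hiM_le (ne : Int) (stop : Bool) : hiM ne stop ≤ 2 * ne - 1 := by
  unfold hiM
  split_ifs
  · exact min_le_left _ _
  · exact le_rfl

-- characterisation: for odd m ≥ 1, m ≤ hiM iff m within A's range and under the stop cut
lemma le_hiM_iff (ne : Int) (stop : Bool) (hne : 1 ≤ ne) (m : Int)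
    (hm1 : 1 ≤ m) (hmo : m % 2 = 1) :
    m ≤ hiM ne stop ↔ m ≤ 2 * ne - 1 ∧ (stop = true → m ^ 4 ≤ ne - 1) := by
  unfold hiM
  by_cases hs : stop = true
  · simp only [if_pos hs]
    obtain ⟨ht0, htle, htub⟩ := iroot4_floor_spec (ne - 1) (by omega)
    set t := iroot4_floor (ne - 1) with htdef
    rw [modtwo]
    constructor
    · intro h
      refine ⟨le_trans h (min_le_left _ _), fun _ => ?_⟩
      have hmt : m ≤ t := by
        have := le_trans h (min_le_right _ _)
        split_ifs at this <;> omega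
      exact le_trans (mono4 (by omega) hmt) htle
    · rintro ⟨h2, h4⟩
      have h4 := h4 hs
      have hmt : m ≤ t := by
        by_contra hc
        push_neg at hc
        have := mono4 (by omega : (0:Int) ≤ t + 1) (by omega : t + 1 ≤ m)
        omega
      refine le_min h2 ?_
      split_ifs <;> omega
  · simp only [if_neg hs]
    simp [hs]

-- if m^4 already reaches n_end, m is past hiM (stop case)
lemma hiM_lt_of_ge (ne : Int) (hne : 1 ≤ ne) (m : Int) (hm : 1 ≤ m)
    (hge : ne ≤ m ^ 4) : hiM ne true < m := by
  unfold hiM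
  simp only [if_pos rfl]
  obtain ⟨ht0, htle, htub⟩ := iroot4_floor_spec (ne - 1) (by omega)
  set t := iroot4_floor (ne - 1) with htdef
  have hmt : t < m := by
    by_contra hc
    push_neg at hc
    have := mono4 (by omega : (0:Int) ≤ m) hc
    omega
  rw [modtwo]
  have h1 : (if t % 2 = 1 then t else t - 1) ≤ t := by split_ifs <;> omega
  calc min (2 * ne - 1) (if t % 2 = 1 then t else t - 1) ≤ _ := min_le_right _ _
    _ ≤ t := h1
    _ < m := hmt

-- A's x-expression is (2a+1)^4 for a ≥ 0.
lemma xval (a : Int) (h : 0 ≤ a) :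
    |a ^ 2 - (a + 1) ^ 2| * |(a + 1) ^ 2 - a ^ 2| ^ 3 = (2 * a + 1) ^ 4 := by
  have h1 : a ^ 2 - (a + 1) ^ 2 = -(2 * a + 1) := by ring
  have h2 : (a + 1) ^ 2 - a ^ 2 = 2 * a + 1 := by ring
  rw [h1, h2, abs_neg, abs_of_nonneg (by omega : (0:Int) ≤ 2 * a + 1)]
  ring

lemma xpos (a : Int) (h : 0 ≤ a) : 0 < (2 * a + 1) ^ 4 :=
  pow_pos (by omega) 4

-- A's step skips when x is below n_start
lemma aStep_noop_low (ns ne : Int) (stop : Bool) (a : Int) (h0 : 0 ≤ a)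
    (hx : (2 * a + 1) ^ 4 < ns) (d : PySem.Dict Int Int) :
    aStep ns ne stop d a = d := by
  unfold aStep
  simp only [xval a h0]
  rw [if_pos (Or.inr hx)]

-- A's step skips once (2a+1)^4 ≥ n_end (stop = true)
lemma aStep_skip (ns ne : Int) (a : Int) (h0 : 0 ≤ a)
    (hx : ne ≤ (2 * a + 1) ^ 4) (d : PySem.Dict Int Int) :
    aStep ns ne true d a = d := by
  unfold aStep
  simp only [xval a h0]
  have hy : (2 * a + 1) ^ 4 * |a - (a + 1)| = (2 * a + 1) ^ 4 := by
    have : a - (a + 1) = -1 := by ring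
    rw [this]; simp
  rw [hy]
  by_cases hns : (2 * a + 1) ^ 4 < ns
  · simp [hns]
  · have hyne : ¬((2 * a + 1) ^ 4 = 0 ∨ (2 * a + 1) ^ 4 < ns) := by
      push_neg
      exact ⟨by have := xpos a h0; omega, by omega⟩
    simp [hx]

-- after the break point the remaining iterations of A are all no-ops
lemma foldl_noop (ns ne : Int) (a : Int) (h0 : 0 ≤ a)
    (hx : ne ≤ (2 * a + 1) ^ 4) (d : PySem.Dict Int Int) :
    (PySem.List.pyRange a ne 1).foldl (aStep ns ne true) d = d := by
  by_cases h : a < ne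
  · rw [PySem.List.pyRange_one_cons h, List.foldl_cons, aStep_skip ns ne a h0 hx d]
    exact foldl_noop ns ne (a + 1) (by omega)
      (le_trans hx (mono4 (by omega) (by omega))) d
  · rw [PySem.List.pyRange_one_eq_nil (by omega)]; rfl
termination_by (ne - a).toNat
decreasing_by omega

-- before loM the iterations of A are all no-ops (x < n_start)
lemma prefix_noop (ns ne : Int) (stop : Bool) (k : Nat) (a : Int) (h0 : 0 ≤ a)
    (hlo : 2 * (a + k) + 1 ≤ loM ns) (d : PySem.Dict Int Int) :
    (PySem.List.pyRange a ne 1).foldl (aStep ns ne stop) d =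
    (PySem.List.pyRange (a + k) ne 1).foldl (aStep ns ne stop) d := by
  induction k generalizing a d with
  | zero => simp
  | succ k ih =>
    by_cases hane : a < ne
    · rw [PySem.List.pyRange_one_cons hane, List.foldl_cons]
      have hx : (2 * a + 1) ^ 4 < ns := by
        obtain ⟨h1, ho, hpow, hbelow⟩ := loM_props ns
        rcases hbelow with he | hblt
        · exfalso; push_cast at hlo; omega
        · have h2 : 2 * a + 1 ≤ loM ns - 2 := by push_cast at hlo; omega
          exact lt_of_le_of_lt (mono4 (by omega) h2) hblt
      rw [aStep_noop_low ns ne stop a h0 hx d]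
      rw [ih (a + 1) (by omega) (by push_cast at hlo ⊢; omega) d]
      congr 1
      push_cast
      ring_nf
    · rw [PySem.List.pyRange_one_eq_nil (by omega),
          PySem.List.pyRange_one_eq_nil (by push_cast; omega)]

-- main invariant: from any a with loM ≤ 2a+1 and fresh keys, A's remaining fold
-- equals B's fold over the odd bases 2a+1, 2a+3, … up to hiM
lemma main_inv (ns ne : Int) (stop : Bool) (hne : 1 ≤ ne) (a : Int) (h0 : 0 ≤ a)
    (hlo : loM ns ≤ 2 * a + 1) (d : PySem.Dict Int Int)
    (hk : ∀ k ∈ d.keys, k < (2 * a + 1) ^ 4) :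
    (PySem.List.pyRange a ne 1).foldl (aStep ns ne stop) d =
    (PySem.List.pyRange (2 * a + 1) (hiM ne stop + 1) 2).foldl
      (fun d m => d.insert (m ^ 4) (m ^ 4)) d := by
  by_cases h : a < ne
  · rw [PySem.List.pyRange_one_cons h, List.foldl_cons]
    by_cases hstop : stop = true ∧ ne ≤ (2 * a + 1) ^ 4
    · obtain ⟨hs, hxe⟩ := hstop
      subst hs
      rw [aStep_skip ns ne a h0 hxe d,
          foldl_noop ns ne (a + 1) (by omega)
            (le_trans hxe (mono4 (by omega) (by omega))) d]
      have := hiM_lt_of_ge ne hne (2 * a + 1) (by omega) hxe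
      rw [pyRange2_nil (by omega)]
      rfl
    · have hxlow : ns ≤ (2 * a + 1) ^ 4 :=
        (loM_le_iff ns (2 * a + 1) (by omega) (by omega)).1 hlo
      have hy : (2 * a + 1) ^ 4 * |a - (a + 1)| = (2 * a + 1) ^ 4 := by
        have : a - (a + 1) = -1 := by ring
        rw [this]; simp
      have hstep : aStep ns ne stop d a =
          d.insert ((2 * a + 1) ^ 4) ((2 * a + 1) ^ 4) := by
        unfold aStep
        simp only [xval a h0, hy]
        have hcond : ¬((2 * a + 1) ^ 4 = 0 ∨ (2 * a + 1) ^ 4 < ns) := by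
          push_neg
          exact ⟨by have := xpos a h0; omega, by omega⟩
        rw [if_neg hcond, if_neg hstop]
        have hnc : d.contains ((2 * a + 1) ^ 4) = false := by
          rw [← Bool.not_eq_true, PySem.Dict.contains_iff_mem_keys]
          intro hmem
          exact absurd (hk _ hmem) (lt_irrefl _)
        have hgd : d.getD ((2 * a + 1) ^ 4) 0 = 0 :=
          PySem.Dict.getD_of_not_contains d 0 hnc
        rw [if_pos (by rw [hgd]; exact xpos a h0)]
      have hmle : 2 * a + 1 ≤ hiM ne stop := by
        refine (le_hiM_iff ne stop hne (2 * a + 1) (by omega) (by omega)).2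
          ⟨by omega, fun hs => ?_⟩
        have : ¬ ne ≤ (2 * a + 1) ^ 4 := fun hxx => hstop ⟨hs, hxx⟩
        omega
      rw [pyRange2_cons (by omega : 2 * a + 1 < hiM ne stop + 1), List.foldl_cons,
          hstep]
      have h21 : 2 * a + 1 + 2 = 2 * (a + 1) + 1 := by ring
      rw [h21]
      refine main_inv ns ne stop hne (a + 1) (by omega) (by omega) _ ?_
      intro kk hkk
      rcases (PySem.Dict.mem_keys_insert _ _ _ _).1 hkk with rfl | hold
      · exact strict4 (by omega) (by omega)
      · exact lt_trans (hk kk hold) (strict4 (by omega) (by omega))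
  · rw [PySem.List.pyRange_one_eq_nil (by omega)]
    have := hiM_le ne stop
    rw [pyRange2_nil (by omega)]
    rfl
termination_by (ne - a).toNat
decreasing_by omega

-- ===== VERDICT =====
theorem compute_max_y_spec : Claim_equal_compute_max_y := by
  intro ns ne stop _
  unfold Spec_compute_max_y compute_max_y compute_max_y_alt
  by_cases hne : ne ≤ 0
  · rw [if_pos hne, PySem.List.pyRange_one_eq_nil (by omega)]
    rfl
  · rw [if_neg hne]
    obtain ⟨h1, ho, hpow, hbelow⟩ := loM_props ns
    have hk0 : (0:Int) + (((loM ns - 1) / 2).toNat : Int) = (loM ns - 1) / 2 := by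
      omega
    rw [prefix_noop ns ne stop ((loM ns - 1) / 2).toNat 0 le_rfl (by omega) PySem.Dict.empty]
    rw [hk0]
    have h2 : 2 * ((loM ns - 1) / 2) + 1 = loM ns := by omega
    congr 1
    rw [main_inv ns ne stop (by omega) ((loM ns - 1) / 2) (by omega) (by omega)
        PySem.Dict.empty (by simp), h2]
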